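-- pv_equiv track=rewrite | github.com/AaronL11/coding-problems | Kattis_Problem/python/solved/kitten.py | dfs
-- ===== SOURCE A (Python) =====
-- def dfs(find, root, tree):
--     stack = [root]
--     found = False
--     if root == find:
--         return (True, stack)
--     if root not in tree:
--         return (False, stack)
--     for k in tree[root]:
--         found,s = dfs(find,k,tree)
--         if found:
--             stack += s
--             return (True, stack)
--     return (False, stack)
-- ===== SOURCE B (Python) =====
-- def dfs(find, root, tree):
--     stack = [(root, [root])]
--     while stack:
--         node, path = stack.pop()
--         if node == find:
--             return (True, path)
--         if node not in tree:
--             continue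
--         for k in reversed(tree[node]):
--             stack.append((k, path + [k]))
--     return (False, [root])
-- ===== Notes on version B (the rewrite author's own statement) =====
-- stated objective: alternative
-- what changed: Replaces the self-recursive DFS (call stack, per-level concatenation of the returned sub-path) by an iterative DFS over an explicit stack of (node, full-path-so-far) pairs.
-- outside the precondition, e.g. on dfs(2, 1, {1: [2, 1]}): A returns (True, [1, 2]), B returns (True, [1, 2])
import Mathlib
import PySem

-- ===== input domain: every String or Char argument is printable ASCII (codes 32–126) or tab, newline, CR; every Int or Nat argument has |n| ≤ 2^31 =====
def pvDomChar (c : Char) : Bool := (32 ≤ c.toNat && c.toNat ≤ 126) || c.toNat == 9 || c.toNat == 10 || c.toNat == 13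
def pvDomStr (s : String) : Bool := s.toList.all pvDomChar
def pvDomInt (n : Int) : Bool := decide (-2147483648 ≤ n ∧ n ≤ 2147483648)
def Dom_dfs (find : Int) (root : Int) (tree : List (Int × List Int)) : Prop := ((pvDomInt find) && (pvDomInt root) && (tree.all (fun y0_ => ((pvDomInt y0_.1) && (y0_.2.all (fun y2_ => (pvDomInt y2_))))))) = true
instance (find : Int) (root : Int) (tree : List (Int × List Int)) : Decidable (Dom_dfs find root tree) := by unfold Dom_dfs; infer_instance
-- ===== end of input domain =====

-- B replaces A's self-recursive DFS by an iterative DFS over an explicit stack of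
-- (node, path) pairs; same return value on every acyclic input (where Python A returns).

-- association-list lookup with LAST match winning: Python's `tree[node]` / `node in tree`
-- on the dict these pairs build (a duplicate key overwrites the earlier value)
def lookupT (tree : List (Int × List Int)) (k : Int) : Option (List Int) :=
  match tree with
  | [] => none
  | (a, cs) :: rest =>
    match lookupT rest k with
    | some v => some v
    | none => if a = k then some cs else none

-- ===== PORT A =====
-- A's recursion can diverge on cyclic input (Python raises RecursionError there);
-- the Nat fuel below is ONLY a totality guard: on Pre_ inputs depth ≤ tree.length + 1
-- and the `none` (fuel-out) branch is never reached (proved below).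
mutual
  -- body of Python `dfs`
  def dfsGo : Nat → Int → List (Int × List Int) → Int → Option (Bool × List Int)
    | 0, _, _, _ => none
    | n + 1, find, tree, root =>
      if root = find then some (true, [root])
      else
        match lookupT tree root with
        | none => some (false, [root])
        | some cs => dfsChildren n find tree root cs
  termination_by n _ _ _ => (n, 0)
  -- the `for k in tree[root]` loop with its early return
  def dfsChildren : Nat → Int → List (Int × List Int) → Int → List Int → Option (Bool × List Int)
    | _, _, _, root, [] => some (false, [root])
    | n, find, tree, root, k :: ks =>
      match dfsGo n find tree k with
      | none => none
      | some (true, s) => some (true, [root] ++ s)   -- stack += s; return (True, stack)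
      | some (false, _) => dfsChildren n find tree root ks
  termination_by n _ _ _ ks => (n, ks.length + 1)
end

def dfs (find : Int) (root : Int) (tree : List (Int × List Int)) : Bool × List Int :=
  (dfsGo (tree.length + 1) find tree root).getD (false, [root])

-- ===== PORT B =====
-- fuel bound for the stack loop (totality guard only; never reached on Pre_ inputs)
def maxChild (tree : List (Int × List Int)) : Nat :=
  tree.foldr (fun p m => max p.2.length m) 0

def fuelB (tree : List (Int × List Int)) : Nat :=
  (maxChild tree + 2) ^ (tree.length + 2)

-- the `while stack:` loop; list head = stack top (Python pushes the children reversed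
-- and pops from the end, hence processes them in list order, exactly as here)
def dfsStack (fuel : Nat) (find : Int) (tree : List (Int × List Int)) (root : Int) :
    List (Int × List Int) → Option (Bool × List Int)
  | stack =>
    match fuel, stack with
    | _, [] => some (false, [root])
    | 0, _ :: _ => none
    | n + 1, (node, path) :: rest =>
      if node = find then some (true, path)
      else
        match lookupT tree node with
        | none => dfsStack n find tree root rest
        | some cs => dfsStack n find tree root (cs.map (fun k => (k, path ++ [k])) ++ rest)

def dfs_alt (find : Int) (root : Int) (tree : List (Int × List Int)) : Bool × List Int :=
  (dfsStack (fuelB tree) find tree root [(root, [root])]).getD (false, [root])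

-- ===== PRECONDITION & SPEC =====
def treeKeys (tree : List (Int × List Int)) : List Int := tree.map Prod.fst

def adjT (tree : List (Int × List Int)) (k : Int) : List Int :=
  (((tree.reverse.find? (fun p => p.1 == k)).map Prod.snd).getD [])

-- one reachability step: add the children of every key already in the set
def stepReach (tree : List (Int × List Int)) (S : List Int) : List Int :=
  S ++ (S.filter (fun x => decide (x ∈ treeKeys tree))).flatMap (adjT tree)

-- everything reachable from k in at least one and at most tree.length + 2 steps
def reachLe (tree : List (Int × List Int)) (k : Int) : List Int :=
  (stepReach tree)^[tree.length + 1] (adjT tree k)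

-- the keys reachable from root (root itself, plus at most tree.length + 1 reachability steps)
def reachRoot (root : Int) (tree : List (Int × List Int)) : List Int :=
  (stepReach tree)^[tree.length + 1] [root]

-- Pre_ excludes the inputs on which Python A can raise RecursionError: trees with a
-- key cycle reachable from root (on some of these, when `find` sits before the cycle
-- in DFS preorder, A still returns — and agrees with B — but Pre_ cannot see that
-- without simulating the search).
def Pre_dfs (find : Int) (root : Int) (tree : List (Int × List Int)) : Prop :=
  ∀ k ∈ treeKeys tree, k ∈ reachRoot root tree → k ∉ reachLe tree k

instance (find : Int) (root : Int) (tree : List (Int × List Int)) : Decidable (Pre_dfs find root tree) := by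
  unfold Pre_dfs; infer_instance

def pvWitness_dfs : Int × Int × (List (Int × List Int)) := (3, 1, [(1, [2, 3]), (2, [])])

def Spec_dfs (find : Int) (root : Int) (tree : List (Int × List Int)) (out : Bool × List Int) : Prop := out = dfs_alt find root tree
instance (find : Int) (root : Int) (tree : List (Int × List Int)) (out : Bool × List Int) : Decidable (Spec_dfs find root tree out) := by unfold Spec_dfs; infer_instance

-- ===== CLAIM (what is proved, stated in full; the proofs are below) =====
def Claim_equal_dfs : Prop := ∀ (find : Int) (root : Int) (tree : List (Int × List Int)), Dom_dfs find root tree → Pre_dfs find root tree → Spec_dfs find root tree (dfs find root tree)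

-- ===== LEMMAS AND PROOFS =====

theorem findRev_eq_lookupT (tree : List (Int × List Int)) (k : Int) :
    (tree.reverse.find? (fun p => p.1 == k)).map Prod.snd = lookupT tree k := by
  induction tree with
  | nil => rfl
  | cons p rest ih =>
    obtain ⟨a, l⟩ := p
    simp only [lookupT, List.reverse_cons, List.find?_append]
    rw [← ih]
    rcases hfi : rest.reverse.find? (fun p => p.1 == k) with _ | w
    · rw [hfi]
      by_cases ha : a = k
      · simp [List.find?, ha]
      · have hb : (a == k) = false := by simp [ha]
        simp [List.find?, hb, if_neg ha]
    · rw [hfi]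
      simp

theorem adjT_eq_lookupT (tree : List (Int × List Int)) (k : Int) :
    adjT tree k = (lookupT tree k).getD [] := by
  unfold adjT
  rw [findRev_eq_lookupT]

-- shape of A's results: the returned list starts at the node searched from
theorem dfsChildren_shape (n : Nat) (find : Int) (tree : List (Int × List Int)) (root : Int) :
    ∀ ks b s, dfsChildren n find tree root ks = some (b, s) →
      (b = false → s = [root]) ∧ (b = true → ∃ t, s = root :: t) := by
  intro ks
  induction ks with
  | nil =>
    intro b s h
    obtain ⟨rfl, rfl⟩ : false = b ∧ [root] = s := by simpa [dfsChildren] using h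
    exact ⟨fun _ => rfl, fun hb => absurd hb (by decide)⟩
  | cons k ks ih =>
    intro b s h
    simp only [dfsChildren] at h
    rcases hk : dfsGo n find tree k with _ | ⟨b', s'⟩ <;> rw [hk] at h
    · simp at h
    · cases b' with
      | true =>
        obtain ⟨rfl, rfl⟩ : true = b ∧ root :: s' = s := by simpa using h
        exact ⟨fun hb => absurd hb (by decide), fun _ => ⟨s', rfl⟩⟩
      | false => exact ih b s (by simpa using h)

theorem dfsGo_shape (n : Nat) (find : Int) (tree : List (Int × List Int)) (root : Int)
    (b : Bool) (s : List Int) (h : dfsGo n find tree root = some (b, s)) :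
    (b = false → s = [root]) ∧ (b = true → ∃ t, s = root :: t) := by
  cases n with
  | zero => simp [dfsGo] at h
  | succ m =>
    simp only [dfsGo] at h
    by_cases hf : root = find
    · rw [if_pos hf] at h
      obtain ⟨rfl, rfl⟩ : true = b ∧ [root] = s := by simpa using h
      exact ⟨fun hb => absurd hb (by decide), fun _ => ⟨[], rfl⟩⟩
    · rw [if_neg hf] at h
      rcases hl : lookupT tree root with _ | cs <;> rw [hl] at h
      · obtain ⟨rfl, rfl⟩ : false = b ∧ [root] = s := by simpa using h
        exact ⟨fun _ => rfl, fun hb => absurd hb (by decide)⟩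
      · exact dfsChildren_shape m find tree root cs b s (by simpa using h)

-- basic facts about the lookup
theorem lookupT_length_le (tree : List (Int × List Int)) (root : Int) (cs : List Int)
    (h : lookupT tree root = some cs) : cs.length ≤ maxChild tree := by
  induction tree with
  | nil => simp [lookupT] at h
  | cons p rest ih =>
    obtain ⟨a, l⟩ := p
    simp only [lookupT] at h
    rcases hre : lookupT rest root with _ | v <;> rw [hre] at h
    · by_cases ha : a = root
      · rw [if_pos ha] at h
        obtain rfl : l = cs := by simpa using h
        simp [maxChild]
      · rw [if_neg ha] at h; simp at h
    · obtain rfl : v = cs := by simpa using h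
      exact le_trans (ih hre) (by simp [maxChild])

theorem lookupT_mem_keys (tree : List (Int × List Int)) (root : Int) (cs : List Int)
    (h : lookupT tree root = some cs) : root ∈ treeKeys tree := by
  induction tree with
  | nil => simp [lookupT] at h
  | cons p rest ih =>
    obtain ⟨a, l⟩ := p
    simp only [lookupT] at h
    rcases hre : lookupT rest root with _ | v <;> rw [hre] at h
    · by_cases ha : a = root
      · simp [treeKeys, ha]
      · rw [if_neg ha] at h; simp at h
    · obtain rfl : v = cs := by simpa using h
      simp only [treeKeys, List.map_cons, List.mem_cons]
      exact Or.inr (ih hre)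

-- simulation: B's stack loop performs A's search, consuming a bounded number of steps
theorem dfs_sim (find : Int) (tree : List (Int × List Int)) : ∀ n : Nat,
    (∀ root path b s, dfsGo n find tree root = some (b, s) →
      ∃ c ≤ (maxChild tree + 2) ^ n, ∀ j rest rt,
        dfsStack (c + j) find tree rt ((root, path) :: rest) =
          (if b then some (true, path ++ s.tail) else dfsStack j find tree rt rest)) ∧
    (∀ root path ks b s, dfsChildren n find tree root ks = some (b, s) →
      ∃ c ≤ ks.length * (maxChild tree + 2) ^ n, ∀ j rest rt,
        dfsStack (c + j) find tree rt (ks.map (fun k => (k, path ++ [k])) ++ rest) =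
          (if b then some (true, path ++ s.tail) else dfsStack j find tree rt rest)) := by
  intro n
  induction n with
  | zero =>
    constructor
    · intro root path b s h; simp [dfsGo] at h
    · intro root path ks b s h
      cases ks with
      | nil =>
        obtain ⟨rfl, rfl⟩ : false = b ∧ [root] = s := by simpa [dfsChildren] using h
        exact ⟨0, le_refl _, fun j rest rt => by simp⟩
      | cons k ks => simp [dfsChildren, dfsGo] at h
  | succ m ih =>
    have hgo : ∀ root path b s, dfsGo (m+1) find tree root = some (b, s) →
        ∃ c ≤ (maxChild tree + 2) ^ (m+1), ∀ j rest rt,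
          dfsStack (c + j) find tree rt ((root, path) :: rest) =
            (if b then some (true, path ++ s.tail) else dfsStack j find tree rt rest) := by
      intro root path b s h
      have hpow : 1 ≤ (maxChild tree + 2) ^ (m+1) := Nat.one_le_pow _ _ (by omega)
      simp only [dfsGo] at h
      by_cases hf : root = find
      · rw [if_pos hf] at h
        obtain ⟨rfl, rfl⟩ : true = b ∧ [root] = s := by simpa using h
        refine ⟨1, hpow, fun j rest rt => ?_⟩
        show dfsStack (1 + j) find tree rt ((root, path) :: rest) = some (true, path ++ [root].tail)
        have : (1 + j) = j + 1 := by omega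
        rw [this]
        simp [dfsStack, hf]
      · rw [if_neg hf] at h
        rcases hl : lookupT tree root with _ | cs <;> rw [hl] at h
        · obtain ⟨rfl, rfl⟩ : false = b ∧ [root] = s := by simpa using h
          refine ⟨1, hpow, fun j rest rt => ?_⟩
          have h1 : (1 + j) = j + 1 := by omega
          rw [h1]
          simp [dfsStack, hf, hl]
        · obtain ⟨c, hc, hrun⟩ := ih.2 root path cs b s h
          have hcs : cs.length ≤ maxChild tree := lookupT_length_le tree root cs hl
          refine ⟨c + 1, ?_, fun j rest rt => ?_⟩
          · have : cs.length * (maxChild tree + 2) ^ m ≤ maxChild tree * (maxChild tree + 2) ^ m :=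
              Nat.mul_le_mul_right _ hcs
            have hpm : 1 ≤ (maxChild tree + 2) ^ m := Nat.one_le_pow _ _ (by omega)
            calc c + 1 ≤ maxChild tree * (maxChild tree + 2) ^ m + 1 := by omega
              _ ≤ (maxChild tree + 2) ^ (m+1) := by
                  rw [pow_succ, mul_comm ((maxChild tree + 2) ^ m) _]
                  have : (maxChild tree + 2) * (maxChild tree + 2) ^ m
                      = maxChild tree * (maxChild tree + 2) ^ m + 2 * (maxChild tree + 2) ^ m := by ring
                  omega
          · have h1 : (c + 1 + j) = (c + j) + 1 := by omega
            rw [h1]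
            show dfsStack ((c + j) + 1) find tree rt ((root, path) :: rest) = _
            calc dfsStack ((c + j) + 1) find tree rt ((root, path) :: rest)
                = dfsStack (c + j) find tree rt (cs.map (fun k => (k, path ++ [k])) ++ rest) := by
                  simp [dfsStack, hf, hl]
              _ = (if b then some (true, path ++ s.tail) else dfsStack j find tree rt rest) :=
                  hrun j rest rt
    refine ⟨hgo, ?_⟩
    intro root path ks b s h
    induction ks generalizing b s with
    | nil =>
      obtain ⟨rfl, rfl⟩ : false = b ∧ [root] = s := by simpa [dfsChildren] using h
      exact ⟨0, by simp, fun j rest rt => by simp⟩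
    | cons k ks ihk =>
      simp only [dfsChildren] at h
      rcases hk : dfsGo (m+1) find tree k with _ | ⟨b', s'⟩ <;> rw [hk] at h
      · simp at h
      · cases b' with
        | true =>
          obtain ⟨rfl, rfl⟩ : true = b ∧ root :: s' = s := by simpa using h
          obtain ⟨t, hst⟩ := (dfsGo_shape (m+1) find tree k true s' hk).2 rfl
          obtain ⟨c, hc, hrun⟩ := hgo k (path ++ [k]) true s' hk
          refine ⟨c, le_trans hc ?_, fun j rest rt => ?_⟩
          · have hpm : 1 ≤ (maxChild tree + 2) ^ (m+1) := Nat.one_le_pow _ _ (by omega)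
            calc (maxChild tree + 2) ^ (m+1) = 1 * (maxChild tree + 2) ^ (m+1) := by ring
              _ ≤ (k :: ks).length * (maxChild tree + 2) ^ (m+1) := by
                  apply Nat.mul_le_mul_right; simp
          · have e1 := hrun j (ks.map (fun k => (k, path ++ [k])) ++ rest) rt
            rw [if_pos rfl] at e1
            simp only [List.map_cons, List.cons_append]
            rw [if_pos trivial, e1, hst]
            simp
        | false =>
          have h' : dfsChildren (m+1) find tree root ks = some (b, s) := by simpa using h
          obtain ⟨c1, hc1, hrun1⟩ := hgo k (path ++ [k]) false _ hk
          obtain ⟨c2, hc2, hrun2⟩ := ihk b s h'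
          refine ⟨c1 + c2, ?_, fun j rest rt => ?_⟩
          · have : (k :: ks).length * (maxChild tree + 2) ^ (m+1)
                = (maxChild tree + 2) ^ (m+1) + ks.length * (maxChild tree + 2) ^ (m+1) := by
              simp [Nat.succ_mul, Nat.add_comm]
            omega
          · have h1 : (c1 + c2 + j) = c1 + (c2 + j) := by omega
            rw [h1]
            simp only [List.map_cons, List.cons_append]
            have e1 := hrun1 (c2 + j) (ks.map (fun k => (k, path ++ [k])) ++ rest) rt
            simp only [if_neg (by decide : ¬ (false : Bool) = true)] at e1
            rw [e1]
            exact hrun2 j rest rt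

-- reachability: stepReach is inflationary and monotone; members step to their children
theorem stepReach_subset_left (tree : List (Int × List Int)) (S : List Int) :
    S ⊆ stepReach tree S := fun _ hx => List.mem_append_left _ hx

theorem stepReach_child (tree : List (Int × List Int)) (S : List Int) (x y : Int)
    (hx : x ∈ S) (hk : x ∈ treeKeys tree) (hy : y ∈ adjT tree x) : y ∈ stepReach tree S := by
  unfold stepReach
  refine List.mem_append_right _ ?_
  rw [List.mem_flatMap]
  exact ⟨x, by simp [List.mem_filter, hx, hk], hy⟩

theorem stepReach_mono (tree : List (Int × List Int)) {S T : List Int} (h : S ⊆ T) :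
    stepReach tree S ⊆ stepReach tree T := by
  intro x hx
  unfold stepReach at hx ⊢
  rcases List.mem_append.1 hx with h1 | h2
  · exact List.mem_append_left _ (h h1)
  · refine List.mem_append_right _ ?_
    rw [List.mem_flatMap] at h2 ⊢
    obtain ⟨a, ha, hxa⟩ := h2
    rw [List.mem_filter] at ha
    exact ⟨a, List.mem_filter.2 ⟨h ha.1, ha.2⟩, hxa⟩

theorem iter_mono (tree : List (Int × List Int)) (t : Nat) {S T : List Int} (h : S ⊆ T) :
    (stepReach tree)^[t] S ⊆ (stepReach tree)^[t] T := by
  induction t generalizing S T with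
  | zero => simpa
  | succ u ihu =>
    rw [Function.iterate_succ_apply, Function.iterate_succ_apply]
    exact ihu (stepReach_mono tree h)

theorem iter_le (tree : List (Int × List Int)) {t u : Nat} (h : t ≤ u) (S : List Int) :
    (stepReach tree)^[t] S ⊆ (stepReach tree)^[u] S := by
  induction h with
  | refl => exact fun _ hx => hx
  | @step v _ ih =>
    intro x hx
    rw [Function.iterate_succ_apply]
    exact iter_mono tree v (stepReach_subset_left tree S) (ih hx)

theorem iter_stepUp (tree : List (Int × List Int)) (t : Nat) (S : List Int) (x y : Int)
    (hx : x ∈ (stepReach tree)^[t] S) (hk : x ∈ treeKeys tree) (hy : y ∈ adjT tree x) :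
    y ∈ (stepReach tree)^[t+1] S := by
  rw [Function.iterate_succ_apply']
  exact stepReach_child tree _ x y hx hk hy

theorem nodup_subset_length {p l : List Int} (hp : p.Nodup) (hsub : ∀ x ∈ p, x ∈ l) :
    p.length ≤ l.length :=
  calc p.length = p.toFinset.card := (List.toFinset_card_of_nodup hp).symm
    _ ≤ l.toFinset.card := Finset.card_le_card (by
        intro x hx
        rw [List.mem_toFinset] at hx ⊢
        exact hsub x hx)
    _ ≤ l.length := l.toFinset_card_le

theorem dfsChildren_ne_none (n : Nat) (find : Int) (tree : List (Int × List Int)) (root : Int)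
    (ks : List Int) (h : ∀ k ∈ ks, dfsGo n find tree k ≠ none) :
    dfsChildren n find tree root ks ≠ none := by
  induction ks with
  | nil => simp [dfsChildren]
  | cons k ks ih =>
    simp only [dfsChildren]
    rcases hk : dfsGo n find tree k with _ | ⟨b, s⟩
    · exact absurd hk (h k (by simp))
    · cases b with
      | true => simp
      | false =>
        show dfsChildren n find tree root ks ≠ none
        exact ih (fun k' hk' => h k' (by simp [hk']))

-- under Pre_ the fuel tree.length + 1 is never exhausted: the ancestor chain p is a
-- nodup list of keys, so A's recursion depth is bounded by the number of keys
theorem dfsGo_suff (find : Int) (root0 : Int) (tree : List (Int × List Int))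
    (hacyc : ∀ k ∈ treeKeys tree, k ∈ reachRoot root0 tree → k ∉ reachLe tree k) :
    ∀ (f : Nat) (p : List Int) (node : Int),
      (∀ i (hi : i < p.length), p[i] ∈ treeKeys tree ∧
        node ∈ (stepReach tree)^[i] (adjT tree p[i])) →
      node ∈ (stepReach tree)^[p.length] [root0] →
      p.Nodup → tree.length + 1 ≤ f + p.length →
      dfsGo f find tree node ≠ none := by
  intro f
  induction f with
  | zero =>
    intro p node hanc _hroot hnd hlen
    exfalso
    have hsub : ∀ x ∈ p, x ∈ treeKeys tree := by
      intro x hx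
      obtain ⟨i, hi, rfl⟩ := List.mem_iff_getElem.1 hx
      exact (hanc i hi).1
    have h1 : p.length ≤ (treeKeys tree).length := nodup_subset_length hnd hsub
    have h2 : (treeKeys tree).length = tree.length := by simp [treeKeys]
    omega
  | succ m ih =>
    intro p node hanc hroot hnd hlen
    simp only [dfsGo]
    by_cases hf : node = find
    · simp [if_pos hf]
    · rw [if_neg hf]
      rcases hl : lookupT tree node with _ | cs
      · simp
      · have hkey : node ∈ treeKeys tree := lookupT_mem_keys tree node cs hl
        have hadj : adjT tree node = cs := by rw [adjT_eq_lookupT, hl]; rfl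
        have hnotin : node ∉ p := by
          intro hmem
          obtain ⟨i, hi, hgi⟩ := List.mem_iff_getElem.1 hmem
          have h2 := (hanc i hi).2
          rw [hgi] at h2
          have hsub : ∀ x ∈ p, x ∈ treeKeys tree := by
            intro x hx
            obtain ⟨i', hi', rfl⟩ := List.mem_iff_getElem.1 hx
            exact (hanc i' hi').1
          have hplen : p.length ≤ tree.length := by
            have := nodup_subset_length hnd hsub
            have h3 : (treeKeys tree).length = tree.length := by simp [treeKeys]
            omega
          have hplen2 : p.length ≤ tree.length + 1 := by omega
          have hrr : node ∈ reachRoot root0 tree := by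
            unfold reachRoot
            exact iter_le tree hplen2 _ hroot
          have : node ∈ reachLe tree node := by
            unfold reachLe
            exact iter_le tree (by omega : i ≤ tree.length + 1) _ h2
          exact hacyc node hkey hrr this
        show dfsChildren m find tree node cs ≠ none
        refine dfsChildren_ne_none m find tree node cs ?_
        intro k hk
        refine ih (node :: p) k ?_ ?hroot2 (List.nodup_cons.2 ⟨hnotin, hnd⟩) (by simp; omega)
        case hroot2 =>
          show k ∈ (stepReach tree)^[p.length + 1] [root0]
          exact iter_stepUp tree p.length _ node k hroot hkey (by rw [hadj]; exact hk)
        intro i hi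
        cases i with
        | zero =>
          refine ⟨hkey, ?_⟩
          simpa [hadj] using hk
        | succ i' =>
          have hi' : i' < p.length := by simpa using hi
          refine ⟨(hanc i' hi').1, ?_⟩
          exact iter_stepUp tree i' _ node k (hanc i' hi').2 hkey (by rw [hadj]; exact hk)

theorem dfsStack_nil (f : Nat) (find : Int) (tree : List (Int × List Int)) (root : Int) :
    dfsStack f find tree root [] = some (false, [root]) := by
  cases f <;> simp [dfsStack]

-- ===== VERDICT (by name: the statement is the Claim_ definition above) =====
theorem dfs_spec : Claim_equal_dfs := by
  intro find root tree _hdom hacyc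
  unfold Spec_dfs
  have hne : dfsGo (tree.length + 1) find tree root ≠ none :=
    dfsGo_suff find root tree hacyc (tree.length + 1) [] root
      (by intro i hi; simp at hi) (by simp) List.nodup_nil (by simp)
  rcases hr : dfsGo (tree.length + 1) find tree root with _ | ⟨b, s⟩
  · exact absurd hr hne
  obtain ⟨c, hc, hrun⟩ := (dfs_sim find tree (tree.length + 1)).1 root [root] b s hr
  have hp1 : 1 ≤ (maxChild tree + 2) ^ (tree.length + 1) := Nat.one_le_pow _ _ (by omega)
  have hW : 2 * (maxChild tree + 2) ^ (tree.length + 1) ≤ fuelB tree := by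
    unfold fuelB
    calc 2 * (maxChild tree + 2) ^ (tree.length + 1)
        ≤ (maxChild tree + 2) * (maxChild tree + 2) ^ (tree.length + 1) :=
          Nat.mul_le_mul_right _ (by omega)
      _ = (maxChild tree + 2) ^ (tree.length + 2) := by ring
  have hcf : c + 1 ≤ fuelB tree := by omega
  have hce : c + (fuelB tree - c) = fuelB tree := by omega
  have e := hrun (fuelB tree - c) [] root
  rw [hce] at e
  cases b with
  | true =>
    rw [if_pos rfl] at e
    obtain ⟨t, hst⟩ := (dfsGo_shape _ _ _ _ _ _ hr).2 rfl
    unfold dfs dfs_alt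
    rw [hr, e]
    simp [hst]
  | false =>
    have hs : s = [root] := (dfsGo_shape _ _ _ _ _ _ hr).1 rfl
    rw [if_neg (by decide), dfsStack_nil] at e
    unfold dfs dfs_alt
    rw [hr, e]
    simp [hs]
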